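-- pv_equiv track=rewrite | github.com/hari8g/eleride_2025 | Cash flow_underwriting/scripts/build_underwriting_features.py | _compute_streak_stats
-- ===== SOURCE A (Python) =====
-- from typing import Iterable
--
-- def _compute_streak_stats(active_weeks: Iterable[int]) -> tuple[int, int, int]:
--     """
--     Given iterable of active week_seq integers, compute:
--       (active_week_count, longest_streak, current_streak_at_end)
--     """
--     weeks = sorted(set(int(w) for w in active_weeks))
--     if not weeks:
--         return 0, 0, 0
--     longest = 1
--     cur = 1
--     for i in range(1, len(weeks)):
--         if weeks[i] == weeks[i - 1] + 1:
--             cur += 1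
--         else:
--             longest = max(longest, cur)
--             cur = 1
--     longest = max(longest, cur)
--     # current streak at end means streak ending at most recent observed active week
--     current = cur
--     return len(weeks), longest, current
-- ===== SOURCE B (Python) =====
-- def _compute_streak_stats(active_weeks):
--     """
--     Same result as A, computed without sorting: a hash-set
--     longest-consecutive-sequence scan, plus a count-down from the
--     maximum for the streak ending at the most recent active week.
--     """
--     s = set(int(w) for w in active_weeks)
--     if not s:
--         return 0, 0, 0
--     longest = 0
--     for w in s:
--         if w - 1 not in s:
--             run = 1
--             while w + run in s:
--                 run += 1
--             if run > longest:
--                 longest = run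
--     current = 1
--     m = max(s)
--     while m - current in s:
--         current += 1
--     return len(s), longest, current
-- ===== Notes on version B (the rewrite author's own statement) =====
-- stated objective: alternative
-- what changed: A sorts the deduplicated weeks and scans adjacent pairs; B never sorts: it scans the hash set, measuring each streak only from its start (w-1 not in the set), and counts down from max(s) for the ending streak.
import Mathlib
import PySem

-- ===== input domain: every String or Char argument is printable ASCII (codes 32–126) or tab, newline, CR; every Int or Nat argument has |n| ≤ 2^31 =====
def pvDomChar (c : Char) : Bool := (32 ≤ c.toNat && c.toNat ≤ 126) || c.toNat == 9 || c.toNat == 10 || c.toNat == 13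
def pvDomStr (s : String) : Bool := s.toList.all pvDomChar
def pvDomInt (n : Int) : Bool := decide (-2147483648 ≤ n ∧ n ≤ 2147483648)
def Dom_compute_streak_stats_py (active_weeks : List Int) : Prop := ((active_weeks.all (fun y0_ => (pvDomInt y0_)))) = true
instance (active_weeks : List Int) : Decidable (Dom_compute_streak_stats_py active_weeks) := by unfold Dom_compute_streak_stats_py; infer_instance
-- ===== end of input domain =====

-- B replaces A's sort-then-scan with a hash-set longest-consecutive-run scan plus a
-- count-down from the maximum (alternative algorithm; no measured speed claim).

-- ===== PORT A =====
def compute_streak_stats_py (active_weeks : List Int) : List Int :=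
  let weeks := PySem.List.sorted (PySem.Set.ofList active_weeks) (fun x => x) false
  if weeks = [] then [0, 0, 0]
  else
    let st := (PySem.List.pyRange 1 weeks.length 1).foldl
      (fun (st : Int × Int) i =>
        if PySem.List.pyGetD weeks i 0 = PySem.List.pyGetD weeks (i - 1) 0 + 1 then
          (st.1, st.2 + 1)
        else (max st.1 st.2, 1)) (1, 1)
    let longest := max st.1 st.2
    [(weeks.length : Int), longest, st.2]

-- ===== PORT B =====
-- 'while w + run in s: run += 1' — fuel s.length is exact: the loop's successive
-- checks put run-1 distinct elements of s above w (itself in s), so it stops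
-- within s.length iterations.
def pvRunUp (s : List Int) : Nat → Int → Int → Int
  | 0, _, run => run
  | fuel + 1, w, run => if (w + run) ∈ s then pvRunUp s fuel w (run + 1) else run

-- 'while m - current in s: current += 1' — same exact fuel bound.
def pvRunDown (s : List Int) : Nat → Int → Int → Int
  | 0, _, cur => cur
  | fuel + 1, m, cur => if (m - cur) ∈ s then pvRunDown s fuel m (cur + 1) else cur

def compute_streak_stats_py_alt (active_weeks : List Int) : List Int :=
  let s := PySem.Set.ofList active_weeks
  if s = [] then [0, 0, 0]
  else
    let longest := s.foldl (fun longest w =>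
      if (w - 1) ∈ s then longest
      else max longest (pvRunUp s s.length w 1)) 0
    let m := (PySem.List.max? s (fun x => x)).getD 0
    let current := pvRunDown s s.length m 1
    [(s.length : Int), longest, current]

-- ===== PRECONDITION & SPEC =====
def Spec_compute_streak_stats_py (active_weeks : List Int) (out : List Int) : Prop := out = compute_streak_stats_py_alt active_weeks
instance (active_weeks : List Int) (out : List Int) : Decidable (Spec_compute_streak_stats_py active_weeks out) := by unfold Spec_compute_streak_stats_py; infer_instance

-- ===== CLAIM (what is proved, stated in full; the proofs are below) =====
def Claim_equal_compute_streak_stats_py : Prop := ∀ (active_weeks : List Int), Dom_compute_streak_stats_py active_weeks → Spec_compute_streak_stats_py active_weeks (compute_streak_stats_py active_weeks)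

-- ===== LEMMAS AND PROOFS =====

-- maximal initial consecutive run: splitRun p t = (n, r) with t = [p+1, …, p+n] ++ r
def splitRun (p : Int) : List Int → Nat × List Int
  | [] => (0, [])
  | y :: t => if y = p + 1 then ((splitRun y t).1 + 1, (splitRun y t).2) else (0, y :: t)

lemma splitRun_snd_length (p : Int) (t : List Int) : (splitRun p t).2.length ≤ t.length := by
  induction t generalizing p with
  | nil => simp [splitRun]
  | cons y t ih =>
    simp only [splitRun]
    split
    · exact le_trans (ih y) (by simp)
    · simp

-- longest run length of a strictly increasing list
def runsMax : List Int → Int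
  | [] => 0
  | w :: t => max (((splitRun w t).1 : Int) + 1) (runsMax (splitRun w t).2)
termination_by l => l.length
decreasing_by
  simpa using Nat.lt_succ_of_le (splitRun_snd_length w t)

-- length of the final run of a strictly increasing list
def lastRun : List Int → Int
  | [] => 0
  | w :: t => if (splitRun w t).2 = [] then ((splitRun w t).1 : Int) + 1 else lastRun (splitRun w t).2
termination_by l => l.length
decreasing_by
  simpa using Nat.lt_succ_of_le (splitRun_snd_length w t)

-- A's loop body as structural recursion on the sorted list (prev, (longest, cur))
def scanA : Int → Int × Int → List Int → Int × Int
  | _, st, [] => st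
  | p, st, y :: t => if y = p + 1 then scanA y (st.1, st.2 + 1) t else scanA y (max st.1 st.2, 1) t

lemma splitRun_props (p : Int) (t : List Int) (hs : (p :: t).Pairwise (· < ·)) :
    t = PySem.List.pyRange (p + 1) (p + 1 + (splitRun p t).1) 1 ++ (splitRun p t).2 ∧
      (∀ y ∈ (splitRun p t).2, p + ((splitRun p t).1 : Int) + 2 ≤ y) := by
  induction t generalizing p with
  | nil =>
    simp [splitRun, PySem.List.pyRange_one_eq_nil]
  | cons y t2 ih =>
    have hy : p < y := (List.pairwise_cons.mp hs).1 y (by simp)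
    have hs2 : (y :: t2).Pairwise (· < ·) := (List.pairwise_cons.mp hs).2
    by_cases hc : y = p + 1
    · subst hc
      obtain ⟨ih1, ih2⟩ := ih (p + 1) hs2
      simp only [splitRun, if_true]
      have hn0 : (0 : Int) ≤ ((splitRun (p + 1) t2).1 : Int) := Int.natCast_nonneg _
      constructor
      · rw [show ((((splitRun (p + 1) t2).1 + 1 : Nat)) : Int) = ((splitRun (p + 1) t2).1 : Int) + 1 by push_cast; ring]
        rw [show (p + 1 + (((splitRun (p + 1) t2).1 : Int) + 1)) = (p + 1 + 1 + ((splitRun (p + 1) t2).1 : Int)) by ring]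
        rw [PySem.List.pyRange_one_cons (by omega)]
        rw [List.cons_append, ← ih1]
      · intro z hz
        have := ih2 z hz
        push_cast
        omega
    · simp only [splitRun, if_neg hc]
      constructor
      · simp [PySem.List.pyRange_one_eq_nil]
      · intro z hz
        push_cast
        rcases List.mem_cons.mp hz with h | h
        · omega
        · have := (List.pairwise_cons.mp hs2).1 z h
          omega

lemma scanA_run (t : List Int) : ∀ (p L C : Int),
    scanA p (L, C) t =
      (match (splitRun p t).2 with
        | [] => (L, C + ((splitRun p t).1 : Int))
        | y :: t' => scanA y (max L (C + ((splitRun p t).1 : Int)), 1) t') := by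
  induction t with
  | nil =>
    intro p L C
    simp [scanA, splitRun]
  | cons y t2 ih =>
    intro p L C
    by_cases hc : y = p + 1
    · simp only [scanA, if_pos hc, splitRun]
      rw [ih y L (C + 1)]
      rcases hr : (splitRun y t2).2 with _ | ⟨y', t3⟩
      · refine congrArg (Prod.mk L) ?_
        push_cast
        omega
      · rw [show C + 1 + ((splitRun y t2).1 : Int) = C + (((splitRun y t2).1 + 1 : Nat) : Int) by push_cast; omega]
    · simp only [scanA, if_neg hc, splitRun]
      simp

lemma runUp_eq (s : List Int) (w : Int) : ∀ (fuel : Nat) (run k : Int), run ≤ k →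
    (∀ j : Int, run ≤ j → j < k → w + j ∈ s) → (w + k) ∉ s → k - run ≤ (fuel : Int) →
    pvRunUp s fuel w run = k := by
  intro fuel
  induction fuel with
  | zero =>
    intro run k h1 _ h3 h4
    have : run = k := by simpa using le_antisymm h1 (by omega)
    simp [pvRunUp, this]
  | succ n ih =>
    intro run k h1 h2 h3 h4
    by_cases hrk : run = k
    · simp [pvRunUp, hrk, h3]
    · have hlt : run < k := lt_of_le_of_ne h1 hrk
      have hmem : (w + run) ∈ s := h2 run le_rfl hlt
      simp only [pvRunUp, if_pos hmem]
      exact ih (run + 1) k (by omega) (fun j hj1 hj2 => h2 j (by omega) hj2) h3 (by push_cast at h4 ⊢; omega)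

lemma runDown_eq (s : List Int) (m : Int) : ∀ (fuel : Nat) (cur k : Int), cur ≤ k →
    (∀ j : Int, cur ≤ j → j < k → m - j ∈ s) → (m - k) ∉ s → k - cur ≤ (fuel : Int) →
    pvRunDown s fuel m cur = k := by
  intro fuel
  induction fuel with
  | zero =>
    intro cur k h1 _ h3 h4
    have : cur = k := by simpa using le_antisymm h1 (by omega)
    simp [pvRunDown, this]
  | succ n ih =>
    intro cur k h1 h2 h3 h4
    by_cases hrk : cur = k
    · simp [pvRunDown, hrk, h3]
    · have hlt : cur < k := lt_of_le_of_ne h1 hrk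
      have hmem : (m - cur) ∈ s := h2 cur le_rfl hlt
      simp only [pvRunDown, if_pos hmem]
      exact ih (cur + 1) k (by omega) (fun j hj1 hj2 => h2 j (by omega) hj2) h3 (by push_cast at h4 ⊢; omega)

-- membership in a strictly increasing list decomposed at its first run
lemma mem_split (p : Int) (t : List Int) (hs : (p :: t).Pairwise (· < ·)) (x : Int) :
    x ∈ (p :: t) ↔ (p ≤ x ∧ x ≤ p + ((splitRun p t).1 : Int)) ∨ x ∈ (splitRun p t).2 := by
  obtain ⟨h1, _⟩ := splitRun_props p t hs
  constructor
  · intro hx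
    rcases List.mem_cons.mp hx with h | h
    · left; constructor <;> [omega; (have : (0:Int) ≤ ((splitRun p t).1 : Int) := Int.natCast_nonneg _; omega)]
    · rw [h1] at h
      rcases List.mem_append.mp h with h | h
      · have := (PySem.List.mem_pyRange_one).mp h
        left; omega
      · right; exact h
  · intro hx
    rcases hx with ⟨ha, hb⟩ | h
    · by_cases hp : x = p
      · simp [hp]
      · refine List.mem_cons.mpr (Or.inr ?_)
        rw [h1]
        refine List.mem_append.mpr (Or.inl ?_)
        exact (PySem.List.mem_pyRange_one).mpr (by omega)
    · refine List.mem_cons.mpr (Or.inr ?_)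
      rw [h1]
      exact List.mem_append.mpr (Or.inr h)

lemma pairwise_snd_splitRun (p : Int) (t : List Int) (hs : (p :: t).Pairwise (· < ·)) :
    (splitRun p t).2.Pairwise (· < ·) := by
  have ht : t.Pairwise (· < ·) := (List.pairwise_cons.mp hs).2
  obtain ⟨h1, _⟩ := splitRun_props p t hs
  have hsub : (splitRun p t).2.Sublist t := by
    conv_rhs => rw [h1]
    exact List.sublist_append_right _ _
  exact List.Pairwise.sublist hsub ht

lemma runsMax_pos (w : Int) (t : List Int) : 1 ≤ runsMax (w :: t) := by
  rw [runsMax]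
  have : (0 : Int) ≤ ((splitRun w t).1 : Int) := Int.natCast_nonneg _
  have h := le_max_left (((splitRun w t).1 : Int) + 1) (runsMax (splitRun w t).2)
  omega

lemma foldl_skip {α : Type} (f : Int → α → Int) : ∀ (xs : List α) (a : Int),
    (∀ x ∈ xs, ∀ b : Int, f b x = b) → xs.foldl f a = a := by
  intro xs
  induction xs with
  | nil => intro a _; rfl
  | cons x xs ih =>
    intro a h
    rw [List.foldl_cons, h x (by simp) a, ih a (fun y hy b => h y (by simp [hy]) b)]

-- B's fold over any list s that agrees with the strictly increasing l above (head l) - 1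
lemma B_main (s : List Int) : ∀ (N : Nat) (l : List Int) (L : Int),
    l.length ≤ N → l.Pairwise (· < ·) → l.length ≤ s.length → 0 ≤ L →
    (∀ (w : Int) (t : List Int), l = w :: t → ∀ x : Int, w - 1 ≤ x → (x ∈ s ↔ x ∈ l)) →
    l.foldl (fun longest w => if (w - 1) ∈ s then longest
      else max longest (pvRunUp s s.length w 1)) L = max L (runsMax l) := by
  intro N
  induction N with
  | zero =>
    intro l L hlen _ _ hL _
    have hl : l = [] := List.eq_nil_of_length_eq_zero (by omega)
    subst hl
    simp [runsMax, max_eq_left hL]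
  | succ N ih =>
    intro l L hlen hpw hsl hL hH
    rcases l with _ | ⟨w, t⟩
    · simp [runsMax, max_eq_left hL]
    · obtain ⟨hdec, hgap⟩ := splitRun_props w t hpw
      have hmeml := mem_split w t hpw
      have hH' := hH w t rfl
      have hlt : t.length = (splitRun w t).1 + (splitRun w t).2.length := by
        have h := congrArg List.length hdec
        rw [List.length_append, PySem.List.length_pyRange_one] at h
        omega
      have hwm : (w - 1) ∉ s := by
        intro hin
        rcases (hmeml (w - 1)).mp ((hH' (w - 1) (by omega)).mp hin) with ⟨h1, h2⟩ | h
        · omega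
        · have := hgap _ h; omega
      have hup : pvRunUp s s.length w 1 = ((splitRun w t).1 : Int) + 1 := by
        apply runUp_eq s w s.length 1 (((splitRun w t).1 : Int) + 1) (by omega)
        · intro j hj1 hj2
          exact (hH' (w + j) (by omega)).mpr ((hmeml _).mpr (Or.inl ⟨by omega, by omega⟩))
        · intro hin
          rcases (hmeml _).mp ((hH' (w + (((splitRun w t).1 : Int) + 1)) (by omega)).mp hin) with ⟨h1, h2⟩ | h
          · omega
          · have := hgap _ h; omega
        · have h1 : (w :: t).length ≤ s.length := hsl
          simp only [List.length_cons] at h1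
          omega
      conv_lhs => rw [show (w :: t) = w :: (PySem.List.pyRange (w + 1) (w + 1 + ((splitRun w t).1 : Int)) 1 ++ (splitRun w t).2) from by rw [← hdec]]
      rw [List.foldl_cons, List.foldl_append, if_neg hwm, hup]
      have hmid : (PySem.List.pyRange (w + 1) (w + 1 + ((splitRun w t).1 : Int)) 1).foldl
          (fun longest w' => if (w' - 1) ∈ s then longest
            else max longest (pvRunUp s s.length w' 1)) (max L (((splitRun w t).1 : Int) + 1))
          = max L (((splitRun w t).1 : Int) + 1) := by
        apply foldl_skip
        intro x hx b
        have hxb := (PySem.List.mem_pyRange_one).mp hx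
        have hxm : (x - 1) ∈ s :=
          (hH' (x - 1) (by omega)).mpr ((hmeml _).mpr (Or.inl ⟨by omega, by omega⟩))
        rw [if_pos hxm]
      rw [hmid]
      rw [ih (splitRun w t).2 (max L (((splitRun w t).1 : Int) + 1))
        (by simp only [List.length_cons] at hlen; omega)
        (pairwise_snd_splitRun w t hpw)
        (by simp only [List.length_cons] at hsl; omega)
        (by have := le_max_left L (((splitRun w t).1 : Int) + 1); omega)
        ?_]
      · rw [runsMax]
        rw [max_assoc]
      · intro w' t' hrw x hx
        have hw' : w + ((splitRun w t).1 : Int) + 2 ≤ w' := hgap w' (by rw [hrw]; simp)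
        rw [hH' x (by omega), hmeml x]
        constructor
        · rintro (⟨h1, h2⟩ | h)
          · omega
          · exact h
        · intro h
          exact Or.inr h

lemma lastRun_spec : ∀ (N : Nat) (l : List Int) (m : Int), l.length ≤ N → l ≠ [] →
    l.Pairwise (· < ·) → m ∈ l → (∀ x ∈ l, x ≤ m) →
    1 ≤ lastRun l ∧ lastRun l ≤ (l.length : Int) ∧
      (∀ j : Int, 0 ≤ j → j < lastRun l → m - j ∈ l) ∧ (m - lastRun l) ∉ l := by
  intro N
  induction N with
  | zero =>
    intro l m hlen hne _ _ _
    exact absurd (List.eq_nil_of_length_eq_zero (by omega)) hne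
  | succ N ih =>
    intro l m hlen hne hpw hm hmax
    rcases l with _ | ⟨w, t⟩
    · exact absurd rfl hne
    obtain ⟨hdec, hgap⟩ := splitRun_props w t hpw
    have hmeml := mem_split w t hpw
    have hlt : t.length = (splitRun w t).1 + (splitRun w t).2.length := by
      have h := congrArg List.length hdec
      rw [List.length_append, PySem.List.length_pyRange_one] at h
      omega
    rcases hr : (splitRun w t).2 with _ | ⟨y, t'⟩
    · have hlr : lastRun (w :: t) = ((splitRun w t).1 : Int) + 1 := by
        rw [lastRun, if_pos hr]
      have hm' : m = w + ((splitRun w t).1 : Int) := by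
        have h1 := (hmeml m).mp hm
        have h2 : (w + ((splitRun w t).1 : Int)) ≤ m :=
          hmax _ ((hmeml _).mpr (Or.inl ⟨by omega, le_refl _⟩))
        rw [hr] at h1
        rcases h1 with ⟨a, b⟩ | h
        · omega
        · simp at h
      refine ⟨by omega, ?_, ?_, ?_⟩
      · rw [hlr]
        simp only [List.length_cons]
        rw [hr] at hlt
        simp at hlt
        omega
      · intro j hj1 hj2
        rw [hlr] at hj2
        exact (hmeml _).mpr (Or.inl ⟨by omega, by omega⟩)
      · rw [hlr]
        intro hcon
        rcases (hmeml _).mp hcon with ⟨a, b⟩ | h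
        · omega
        · rw [hr] at h; simp at h
    · have hpwr : (y :: t').Pairwise (· < ·) := by
        have := pairwise_snd_splitRun w t hpw
        rwa [hr] at this
      have hy : w + ((splitRun w t).1 : Int) + 2 ≤ y := hgap y (by rw [hr]; simp)
      have hmr : m ∈ (y :: t') := by
        rcases (hmeml m).mp hm with ⟨a, b⟩ | h
        · exfalso
          have hyl : y ∈ (w :: t) := (hmeml y).mpr (Or.inr (by rw [hr]; simp))
          have := hmax y hyl
          omega
        · rwa [hr] at h
      have hmaxr : ∀ x ∈ (y :: t'), x ≤ m := fun x hx =>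
        hmax x ((hmeml x).mpr (Or.inr (by rw [hr]; exact hx)))
      have hlenr : (y :: t').length ≤ N := by
        have h := splitRun_snd_length w t
        rw [hr] at h
        simp only [List.length_cons] at hlen h ⊢
        omega
      obtain ⟨ih1, ih2, ih3, ih4⟩ := ih (y :: t') m hlenr (by simp) hpwr hmr hmaxr
      have hlr : lastRun (w :: t) = lastRun (y :: t') := by
        rw [lastRun, if_neg (by rw [hr]; simp), hr]
      have hylo : ∀ x ∈ (y :: t'), y ≤ x := by
        intro x hx
        rcases List.mem_cons.mp hx with rfl | h
        · exact le_refl _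
        · exact le_of_lt ((List.pairwise_cons.mp hpwr).1 x h)
      have hbig : y ≤ m - (lastRun (y :: t') - 1) :=
        hylo _ (ih3 (lastRun (y :: t') - 1) (by omega) (by omega))
      refine ⟨by omega, ?_, ?_, ?_⟩
      · rw [hlr]
        simp only [List.length_cons] at ih2 ⊢
        rw [hr] at hlt
        simp only [List.length_cons] at hlt
        omega
      · intro j hj1 hj2
        rw [hlr] at hj2
        exact (hmeml _).mpr (Or.inr (by rw [hr]; exact ih3 j hj1 hj2))
      · rw [hlr]
        intro hcon
        rcases (hmeml _).mp hcon with ⟨a, b⟩ | h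
        · omega
        · rw [hr] at h
          exact ih4 h

-- A's indexed loop over the sorted list is scanA on its tail
lemma A_loop (l : List Int) : ∀ (N i : Nat) (st : Int × Int), l.length = i + N → 1 ≤ i →
    (PySem.List.pyRange i l.length 1).foldl
      (fun (st : Int × Int) j =>
        if PySem.List.pyGetD l j 0 = PySem.List.pyGetD l (j - 1) 0 + 1 then
          (st.1, st.2 + 1)
        else (max st.1 st.2, 1)) st = scanA (l.getD (i - 1) 0) st (l.drop i) := by
  intro N
  induction N with
  | zero =>
    intro i st hlen _
    have : (l.length : Int) ≤ (i : Int) := by omega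
    rw [PySem.List.pyRange_one_eq_nil this]
    rw [List.drop_of_length_le (by omega)]
    rfl
  | succ N ih =>
    intro i st hlen hi
    have hilt : i < l.length := by omega
    rw [PySem.List.pyRange_one_cons (by exact_mod_cast hilt)]
    rw [List.foldl_cons]
    rw [show ((i : Int) + 1) = ((i + 1 : Nat) : Int) by omega]
    rw [ih (i + 1) _ (by omega) (by omega)]
    rw [List.drop_eq_getElem_cons hilt]
    have hg1 : PySem.List.pyGetD l (i : Int) 0 = l[i] := by
      rw [PySem.List.pyGetD_natCast]
      exact List.getD_eq_getElem l 0 hilt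
    have hg2 : PySem.List.pyGetD l ((i : Int) - 1) 0 = l.getD (i - 1) 0 := by
      rw [show ((i : Int) - 1) = ((i - 1 : Nat) : Int) by omega]
      exact PySem.List.pyGetD_natCast l _ 0
    have hg3 : l.getD (i + 1 - 1) 0 = l[i] := by
      simp only [Nat.add_sub_cancel]
      exact List.getD_eq_getElem l 0 hilt
    rw [hg1, hg2, hg3]
    by_cases hc : l[i] = l.getD (i - 1) 0 + 1
    · simp only [if_pos hc, scanA]
    · simp only [if_neg hc, scanA]

-- the two derived quantities of the scan
lemma scanA_final : ∀ (N : Nat) (w : Int) (t : List Int), t.length ≤ N →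
    (w :: t).Pairwise (· < ·) → ∀ L : Int,
    (max (scanA w (L, 1) t).1 (scanA w (L, 1) t).2 = max L (runsMax (w :: t))) ∧
      (scanA w (L, 1) t).2 = lastRun (w :: t) := by
  intro N
  induction N with
  | zero =>
    intro w t hlen _ L
    have ht : t = [] := List.eq_nil_of_length_eq_zero (by omega)
    subst ht
    have h1 : runsMax [w] = 1 := by
      rw [runsMax]
      norm_num [splitRun, runsMax]
    have h2 : lastRun [w] = 1 := by
      rw [lastRun]
      norm_num [splitRun]
    constructor
    · simp [scanA, h1]
    · simp [scanA, h2]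
  | succ N ih =>
    intro w t hlen hpw L
    rw [scanA_run t w L 1]
    rcases hr : (splitRun w t).2 with _ | ⟨y, t'⟩
    · dsimp only
      constructor
      · rw [runsMax, hr]
        simp only [runsMax]
        simp only [max_def]
        split_ifs <;> omega
      · rw [lastRun, if_pos hr]
        omega
    · have hpwr : (y :: t').Pairwise (· < ·) := by
        have := pairwise_snd_splitRun w t hpw
        rwa [hr] at this
      have hlenr : t'.length ≤ N := by
        have h := splitRun_snd_length w t
        rw [hr] at h
        simp only [List.length_cons] at h
        omega
      obtain ⟨ih1, ih2⟩ := ih y t' hlenr hpwr (max L (1 + ((splitRun w t).1 : Int)))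
      constructor
      · rw [ih1]
        conv_rhs => rw [runsMax]
        rw [hr]
        simp only [max_def]
        split_ifs <;> omega
      · rw [ih2]
        conv_rhs => rw [lastRun]
        rw [hr]
        simp

lemma runUp_congr (s l : List Int) (hml : ∀ x : Int, x ∈ s ↔ x ∈ l) (w : Int) :
    ∀ (fuel : Nat) (run : Int), pvRunUp s fuel w run = pvRunUp l fuel w run := by
  intro fuel
  induction fuel with
  | zero => intro run; rfl
  | succ n ih =>
    intro run
    simp only [pvRunUp, hml, ih]

lemma runDown_congr (s l : List Int) (hml : ∀ x : Int, x ∈ s ↔ x ∈ l) (m : Int) :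
    ∀ (fuel : Nat) (cur : Int), pvRunDown s fuel m cur = pvRunDown l fuel m cur := by
  intro fuel
  induction fuel with
  | zero => intro cur; rfl
  | succ n ih =>
    intro cur
    simp only [pvRunDown, hml, ih]

lemma ports_eq (xs : List Int) : compute_streak_stats_py xs = compute_streak_stats_py_alt xs := by
  have hpw : (PySem.List.sorted (PySem.Set.ofList xs) (fun x => x) false).Pairwise (· < ·) :=
    PySem.List.sorted_ofList_pairwise_lt xs
  have hperm : (PySem.List.sorted (PySem.Set.ofList xs) (fun x => x) false).Perm (PySem.Set.ofList xs) :=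
    PySem.List.sorted_perm _ _ _
  have hmem : ∀ x : Int, x ∈ PySem.List.sorted (PySem.Set.ofList xs) (fun x => x) false ↔
      x ∈ PySem.Set.ofList xs := by
    intro x
    simp [PySem.List.mem_sorted]
  simp only [compute_streak_stats_py, compute_streak_stats_py_alt]
  generalize hsdef : PySem.Set.ofList xs = s at hpw hperm hmem ⊢
  generalize hldef : PySem.List.sorted s (fun x => x) false = l at hpw hperm hmem ⊢
  by_cases hnil : s = []
  · have hl : l = [] := by
      subst hnil
      exact hperm.eq_nil
    simp [hl, hnil]
  · have hlne : l ≠ [] := by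
      intro h
      apply hnil
      have hq := hperm.length_eq
      rw [h] at hq
      exact List.eq_nil_of_length_eq_zero (by simpa using hq.symm)
    rcases l with _ | ⟨w, t⟩
    · exact absurd rfl hlne
    rw [if_neg (List.cons_ne_nil w t), if_neg hnil]
    have hml : ∀ x : Int, x ∈ s ↔ x ∈ (w :: t) := fun x => (hmem x).symm
    have hslen : s.length = (w :: t).length := hperm.length_eq.symm
    -- A's loop
    have hA := A_loop (w :: t) t.length 1 (1, 1) (by simp [Nat.add_comm]) (le_refl 1)
    rw [show ((1 : Nat) : Int) = 1 by norm_num] at hA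
    simp only [Nat.sub_self, List.getD_cons_zero, List.drop_succ_cons, List.drop_zero] at hA
    rw [hA]
    have hfinal := scanA_final t.length w t (le_refl _) hpw 1
    rw [hfinal.1, hfinal.2, max_eq_right (runsMax_pos w t)]
    -- B's fold
    have hfun : (fun (longest w' : Int) => if w' - 1 ∈ s then longest
          else max longest (pvRunUp s s.length w' 1))
        = (fun (longest w' : Int) => if w' - 1 ∈ (w :: t) then longest
          else max longest (pvRunUp (w :: t) (w :: t).length w' 1)) := by
      funext a x
      rw [runUp_congr s (w :: t) hml x s.length 1, hslen]
      by_cases hc : (x - 1) ∈ s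
      · rw [if_pos hc, if_pos ((hml _).mp hc)]
      · rw [if_neg hc, if_neg (fun hq => hc ((hml _).mpr hq))]
    rw [hfun]
    have hBfold : s.foldl (fun (longest w' : Int) => if w' - 1 ∈ (w :: t) then longest
          else max longest (pvRunUp (w :: t) (w :: t).length w' 1)) 0
        = (w :: t).foldl (fun (longest w' : Int) => if w' - 1 ∈ (w :: t) then longest
          else max longest (pvRunUp (w :: t) (w :: t).length w' 1)) 0 := by
      refine hperm.symm.foldl_eq' ?_ 0
      intro x _ y _ z
      dsimp only
      by_cases h1 : (x - 1) ∈ (w :: t) <;> by_cases h2 : (y - 1) ∈ (w :: t) <;>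
        simp [h1, h2, max_right_comm]
    rw [hBfold]
    rw [B_main (w :: t) (w :: t).length (w :: t) 0 (le_refl _) hpw (le_refl _) (le_refl _)
      (fun w' t' _ x _ => Iff.rfl)]
    rw [max_eq_right (le_trans (by norm_num) (runsMax_pos w t))]
    -- B's current
    obtain ⟨m, hm⟩ : ∃ m, PySem.List.max? s (fun x => x) = some m := by
      rcases hmm : PySem.List.max? s (fun x => x) with _ | m
      · exact absurd (by rwa [PySem.List.max?_eq_none_iff] at hmm) hnil
      · exact ⟨m, rfl⟩
    rw [hm]
    simp only [Option.getD_some]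
    have hmmem : m ∈ s := PySem.List.max?_mem hm
    have hmax : ∀ x ∈ (w :: t), x ≤ m := fun x hx => by
      simpa using PySem.List.max?_isMax hm x ((hmem x).mp hx)
    have hspec := lastRun_spec (w :: t).length (w :: t) m (le_refl _) (by simp) hpw
      ((hmem m).mpr hmmem) hmax
    have hdown : pvRunDown s s.length m 1 = lastRun (w :: t) := by
      rw [runDown_congr s (w :: t) hml m s.length 1, hslen]
      exact runDown_eq (w :: t) m (w :: t).length 1 (lastRun (w :: t)) hspec.1
        (fun j hj1 hj2 => hspec.2.2.1 j (by omega) hj2) hspec.2.2.2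
        (by have := hspec.2.1; simp only [List.length_cons] at this ⊢; omega)
    rw [hdown, hslen]

-- ===== VERDICT (by name: the statement is the Claim_ definition above) =====
theorem compute_streak_stats_py_spec : Claim_equal_compute_streak_stats_py := by
  intro active_weeks _
  unfold Spec_compute_streak_stats_py
  exact ports_eq active_weeks
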